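-- pv_equiv track=rewrite | github.com/eliopuff/battleship-game | search-engine.py | find_max_results
-- ===== SOURCE A (Python) =====
-- from typing import Dict
--
-- def find_max_results(max_results: int, ranking_dict: Dict):
--     '''this function finds amongst the dictionary depicting
--     the ranked pages in the index those to be considered in the
--     moogle search, according to the int max_results'''
--     max_results_dict = {}
--     sorted_ranks = sorted(list(ranking_dict.values()),
--     reverse=True)
--     if len(sorted_ranks) < max_results:
--         max_results = len(sorted_ranks)
--         #all will be considered in this case
--     max_results_ranks = sorted_ranks[:max_results]
--     for page in ranking_dict:
--         if ranking_dict[page] in max_results_ranks: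
--             max_results_dict[page] = ranking_dict[page]
--     return max_results_dict
-- ===== SOURCE B (Python) =====
-- def find_max_results(max_results: int, ranking_dict: dict):
--     ranks = list(ranking_dict.values())
--     k = len(ranks[:max_results])  # how many of the top ranks are retained
--     return {page: rank for page, rank in ranking_dict.items()
--             if sum(1 for v in ranks if v > rank) < k}
-- ===== Notes on version B (the rewrite author's own statement) =====
-- stated objective: alternative
-- what changed: B does not sort at all: instead of sorting the values descending, slicing the top-k and testing membership in that list, it keeps a page iff the number of values strictly greater than its rank is below k (rank-by-counting selection), with k just the retained-slice length.
import Mathlib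
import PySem

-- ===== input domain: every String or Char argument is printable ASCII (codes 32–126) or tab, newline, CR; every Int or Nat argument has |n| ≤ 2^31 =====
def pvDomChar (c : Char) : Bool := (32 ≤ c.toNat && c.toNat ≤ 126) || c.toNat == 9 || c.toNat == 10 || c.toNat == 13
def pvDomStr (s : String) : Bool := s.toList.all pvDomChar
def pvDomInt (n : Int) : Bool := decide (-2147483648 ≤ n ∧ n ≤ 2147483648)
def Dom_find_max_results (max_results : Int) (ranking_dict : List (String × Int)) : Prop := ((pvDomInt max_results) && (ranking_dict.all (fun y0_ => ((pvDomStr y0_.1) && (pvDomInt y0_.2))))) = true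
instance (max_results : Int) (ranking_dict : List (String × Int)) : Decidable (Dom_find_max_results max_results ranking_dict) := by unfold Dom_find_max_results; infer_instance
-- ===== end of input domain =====

-- B replaces sort-slice-membership by rank-by-counting selection: a page is kept iff
-- fewer than k values are strictly greater than its rank; objective: alternative.

-- ===== PORT A =====
def find_max_results (max_results : Int) (ranking_dict : List (String × Int)) : List (String × Int) :=
  let sorted_ranks := PySem.List.sorted (ranking_dict.map Prod.snd) (fun x => x) true
  let max_results := if (sorted_ranks.length : Int) < max_results then (sorted_ranks.length : Int) else max_results
  let max_results_ranks := PySem.List.slice sorted_ranks none (some max_results)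
  ranking_dict.foldl (fun acc pv => if pv.2 ∈ max_results_ranks then acc ++ [pv] else acc) []

-- ===== PORT B =====
def find_max_results_alt (max_results : Int) (ranking_dict : List (String × Int)) : List (String × Int) :=
  let ranks := ranking_dict.map Prod.snd
  let k := (PySem.List.slice ranks none (some max_results)).length
  ranking_dict.filter (fun pv => ranks.countP (fun v => decide (pv.2 < v)) < k)

-- ===== PRECONDITION & SPEC =====
def Spec_find_max_results (max_results : Int) (ranking_dict : List (String × Int)) (out : List (String × Int)) : Prop := out = find_max_results_alt max_results ranking_dict
instance (max_results : Int) (ranking_dict : List (String × Int)) (out : List (String × Int)) : Decidable (Spec_find_max_results max_results ranking_dict out) := by unfold Spec_find_max_results; infer_instance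

-- ===== CLAIM (what is proved, stated in full; the proofs are below) =====
def Claim_equal_find_max_results : Prop := ∀ (max_results : Int) (ranking_dict : List (String × Int)), Dom_find_max_results max_results ranking_dict → Spec_find_max_results max_results ranking_dict (find_max_results max_results ranking_dict)

-- ===== LEMMAS AND PROOFS =====

-- xs[:m] is a take-prefix whose length depends only on |xs| and m
theorem pv_slice_is_take (xs : List Int) (m : Int) :
    ∃ n : Nat, PySem.List.slice xs none (some m) = xs.take n ∧
      n = (if 0 ≤ m then m.toNat else xs.length - (-m).toNat) := by
  by_cases hm : 0 ≤ m
  · exact ⟨m.toNat, PySem.List.slice_to xs hm, by simp [hm]⟩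
  · obtain ⟨k, hk0, hmk⟩ : ∃ k : Nat, 0 < k ∧ m = -(k : Int) := ⟨(-m).toNat, by omega, by omega⟩
    subst hmk
    exact ⟨xs.length - k, PySem.List.slice_to_neg_natCast xs k hk0, by rw [if_neg hm]; omega⟩

-- in a descending list, v ∈ take n ⟺ fewer than n elements exceed v (for v ∈ s)
theorem pv_mem_take_iff_countP {s : List Int} (hs : s.Pairwise (fun a b => b ≤ a))
    {v : Int} (hv : v ∈ s) (n : Nat) :
    v ∈ s.take n ↔ s.countP (fun w => decide (v < w)) < n := by
  induction s generalizing n with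
  | nil => simp at hv
  | cons a t ih =>
    have hpc := List.pairwise_cons.mp hs
    cases n with
    | zero => simp
    | succ n' =>
      rcases List.mem_cons.mp hv with rfl | hvt
      · -- v = a: head of the prefix; no element exceeds v
        have hz : t.countP (fun w => decide (v < w)) = 0 := by
          rw [List.countP_eq_zero]
          intro w hw
          simpa using not_lt.mpr (hpc.1 w hw)
        simp [List.countP_cons, hz]
      · by_cases hva : v = a
        · subst hva
          have hz : t.countP (fun w => decide (v < w)) = 0 := by
            rw [List.countP_eq_zero]
            intro w hw
            simpa using not_lt.mpr (hpc.1 w hw)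
          simp [List.countP_cons, hz]
        · have hvlt : v < a := lt_of_le_of_ne (hpc.1 v hvt) hva
          have := ih hpc.2 hvt n'
          have hcd : decide (v < a) = true := decide_eq_true hvlt
          simp only [List.take_succ_cons, List.mem_cons, List.countP_cons, hcd,
            if_pos, this]
          constructor
          · rintro (rfl | h)
            · exact absurd rfl hva
            · omega
          · intro h; right; omega

-- ===== VERDICT (by name: the statement is the Claim_ definition above) =====
theorem find_max_results_spec : Claim_equal_find_max_results := by
  intro m d _
  show find_max_results m d = find_max_results_alt m d
  simp only [find_max_results, find_max_results_alt]
  set r := d.map Prod.snd with hrdef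
  set s := PySem.List.sorted r (fun x => x) true with hsdef
  have hpw : s.Pairwise (fun a b => b ≤ a) := PySem.List.sorted_pairwise_rev r (fun x => x)
  have hlen : s.length = r.length := PySem.List.length_sorted r (fun x => x) true
  have hcap : PySem.List.slice s none (some (if (s.length : Int) < m then (s.length : Int) else m))
      = PySem.List.slice s none (some m) := by
    split_ifs with hlt
    · rw [PySem.List.slice_to s (by positivity), PySem.List.slice_to s (by omega)]
      rw [List.take_of_length_le (by omega), List.take_of_length_le (by omega)]
    · rfl
  rw [hcap]
  obtain ⟨n, hsn, hnval⟩ := pv_slice_is_take s m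
  obtain ⟨n', hrn, hnval'⟩ := pv_slice_is_take r m
  have hnn : n = n' := by rw [hnval, hnval', hlen]
  subst hnn
  rw [hsn, hrn, PySem.List.foldl_append_ite_eq_filter, List.nil_append]
  apply List.filter_congr
  intro pv hpv
  have hvs : pv.2 ∈ s := by
    rw [hsdef, PySem.List.mem_sorted]
    exact List.mem_map_of_mem hpv
  have hcount : s.countP (fun w => decide (pv.2 < w)) = r.countP (fun w => decide (pv.2 < w)) :=
    (PySem.List.sorted_perm r (fun x => x) true).countP_eq _
  have hmem_r : pv.2 ∈ r := List.mem_map_of_mem hpv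
  have hlt : r.countP (fun w => decide (pv.2 < w)) < r.length := by
    refine lt_of_le_of_ne List.countP_le_length ?_
    intro heq
    have := (List.countP_eq_length.mp heq) pv.2 hmem_r
    simp at this
  simp only [decide_eq_decide, List.length_take]
  rw [pv_mem_take_iff_countP hpw hvs n, hcount]
  omega
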